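-- pv_equiv track=rewrite | github.com/pranjalsingh7456/Leetcode-Solutions-Python | spy_number.py | spy
-- ===== SOURCE A (Python) =====
-- def spy (n):
--
--     def sod(n1):
--         sum = 0
--         while n1>0:
--           digit = n1%10
--           sum = sum + digit
--           n1 = n1//10
--         return sum
--     def pod(n1):
--         pro = 1
--         while n1>0:
--           digit = n1%10
--           pro = pro * digit
--           n1 = n1//10
--         return pro
--
--
--     if sod(n) == pod(n) :
--        return True
--     else:
--        return False
-- ===== SOURCE B (Python) =====
-- def spy(n):
--     s = 0
--     p = 1
--     while n > 0:
--         digit = n % 10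
--         s += digit
--         p *= digit
--         n //= 10
--     return s == p
-- ===== Notes on version B (the rewrite author's own statement) =====
-- stated objective: simpler
-- what changed: Replaces A's two helper functions, each with its own digit-extraction while loop, by a single fused while loop maintaining both the sum and product accumulators in one pass.
import Mathlib
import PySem

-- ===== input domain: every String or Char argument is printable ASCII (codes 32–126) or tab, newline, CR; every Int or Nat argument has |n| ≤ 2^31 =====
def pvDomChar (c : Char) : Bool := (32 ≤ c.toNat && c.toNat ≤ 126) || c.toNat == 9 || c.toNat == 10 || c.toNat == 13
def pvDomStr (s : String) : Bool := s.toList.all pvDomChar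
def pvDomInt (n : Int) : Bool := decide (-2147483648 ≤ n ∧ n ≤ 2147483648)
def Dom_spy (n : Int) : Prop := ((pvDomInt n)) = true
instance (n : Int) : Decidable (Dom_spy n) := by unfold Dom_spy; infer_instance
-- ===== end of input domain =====

-- B is A with the two digit loops fused into one pass maintaining both accumulators (objective: simpler).

theorem spy_step_lt (n1 : Int) (h : 0 < n1) :
    (PySem.Int.floordiv n1 10).toNat < n1.toNat := by
  rw [PySem.Int.floordiv_eq_ediv_of_pos (by omega)]; omega

-- ===== PORT A =====
-- helper sod: while n1>0: digit = n1%10; sum = sum + digit; n1 = n1//10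
def spySod (n1 : Int) (sum : Int) : Int :=
  if h : 0 < n1 then
    spySod (PySem.Int.floordiv n1 10) (sum + PySem.Int.mod n1 10)
  else sum
termination_by n1.toNat
decreasing_by exact spy_step_lt _ h

-- helper pod: while n1>0: digit = n1%10; pro = pro * digit; n1 = n1//10
def spyPod (n1 : Int) (pro : Int) : Int :=
  if h : 0 < n1 then
    spyPod (PySem.Int.floordiv n1 10) (pro * PySem.Int.mod n1 10)
  else pro
termination_by n1.toNat
decreasing_by exact spy_step_lt _ h

def spy (n : Int) : Bool :=
  if spySod n 0 = spyPod n 1 then true else false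

-- ===== PORT B =====
-- single fused loop carrying (s, p)
def spyLoop (n : Int) (s : Int) (p : Int) : Int × Int :=
  if h : 0 < n then
    spyLoop (PySem.Int.floordiv n 10) (s + PySem.Int.mod n 10) (p * PySem.Int.mod n 10)
  else (s, p)
termination_by n.toNat
decreasing_by exact spy_step_lt _ h

def spy_alt (n : Int) : Bool :=
  let sp := spyLoop n 0 1
  sp.1 == sp.2

-- ===== PRECONDITION & SPEC =====
def Spec_spy (n : Int) (out : Bool) : Prop := out = spy_alt n
instance (n : Int) (out : Bool) : Decidable (Spec_spy n out) := by unfold Spec_spy; infer_instance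

-- ===== CLAIM (what is proved, stated in full; the proofs are below) =====
def Claim_equal_spy : Prop := ∀ (n : Int), Dom_spy n → Spec_spy n (spy n)

-- ===== LEMMAS AND PROOFS =====
theorem spyLoop_eq (n s p : Int) : spyLoop n s p = (spySod n s, spyPod n p) := by
  fun_induction spyLoop n s p with
  | case1 n s p h ih =>
      rw [spySod.eq_def, spyPod.eq_def]; simp only [dif_pos h]; exact ih
  | case2 n s p h =>
      rw [spySod.eq_def, spyPod.eq_def]; simp only [dif_neg h]

-- ===== VERDICT (by name: the statement is the Claim_ definition above) =====
theorem spy_spec : Claim_equal_spy := by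
  intro n _
  unfold Spec_spy spy spy_alt
  rw [spyLoop_eq]
  by_cases h : spySod n 0 = spyPod n 1 <;> simp [h]
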